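-- pv_equiv track=rewrite | github.com/manurFR/advent-of-code | 2023/day13.py | detect_vertical
-- ===== SOURCE A (Python) =====
-- def detect_vertical(ptrn, exclude=None):
--     for mid in range(1, len(ptrn)):  # try symmetry at rows 1, 2, ..., len-1
--         if exclude and mid == exclude:
--             continue
--         # if mid is close to the top or bottom, the other half of the symmetry is truncated, so take only the visible part
--         t_size = min(mid, len(ptrn) - mid)
--         if ptrn[mid - t_size : mid] == list(reversed(ptrn[mid : mid + t_size])):
--             return mid
--     return 0
-- ===== SOURCE B (Python) =====
-- def detect_vertical(ptrn, exclude=None):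
--     # Walk the rows once, maintaining the already-seen prefix in reversed order;
--     # an axis at `mid` is valid iff that reversed prefix and the remaining rows
--     # agree elementwise as far as the shorter of the two reaches (zip truncates).
--     rev = []
--     rest = list(ptrn)
--     mid = 1
--     while rest:
--         rev = [rest[0]] + rev
--         rest = rest[1:]
--         if not rest:
--             break
--         if not (exclude and mid == exclude):
--             if all(a == b for a, b in zip(rev, rest)):
--                 return mid
--         mid += 1
--     return 0
-- ===== Notes on version B (the rewrite author's own statement) =====
-- stated objective: alternative
-- what changed: Replaced A's indexed scan that builds and reverses two half-slices for every candidate axis with a single walk over the rows that maintains the reversed prefix incrementally and tests each axis by a truncating zip comparison of the reversed prefix against the remaining suffix.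
import Mathlib
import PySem

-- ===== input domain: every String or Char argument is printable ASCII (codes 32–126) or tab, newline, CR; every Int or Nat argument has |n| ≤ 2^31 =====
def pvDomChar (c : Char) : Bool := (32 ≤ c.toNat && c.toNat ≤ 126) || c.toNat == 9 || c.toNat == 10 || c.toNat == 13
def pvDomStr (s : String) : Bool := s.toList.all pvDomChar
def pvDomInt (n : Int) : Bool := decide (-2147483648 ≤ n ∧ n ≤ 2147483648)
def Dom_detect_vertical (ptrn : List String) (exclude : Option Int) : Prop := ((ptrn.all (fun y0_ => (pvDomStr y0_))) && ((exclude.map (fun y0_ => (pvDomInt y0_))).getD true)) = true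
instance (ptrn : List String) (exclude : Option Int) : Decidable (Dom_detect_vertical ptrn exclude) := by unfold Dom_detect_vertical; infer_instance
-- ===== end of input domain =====

-- B replaces A's per-mid slice building and reversed-list comparison by a single walk
-- that carries the reversed prefix and tests each axis with a truncating zip comparison
-- (objective: alternative).


-- ===== PORT A =====
-- `exclude and mid == exclude`: truthy exclude (not None, nonzero) and equal to mid
def pvSkip (exclude : Option Int) (mid : Int) : Bool :=
  match exclude with
  | some e => decide (e ≠ 0 ∧ mid = e)
  | none => false

-- `ptrn[mid - t_size : mid] == list(reversed(ptrn[mid : mid + t_size]))`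
def pvAcheck (ptrn : List String) (mid : Int) : Bool :=
  let t := min mid ((ptrn.length : Int) - mid)
  decide (PySem.List.slice ptrn (some (mid - t)) (some mid) =
          (PySem.List.slice ptrn (some mid) (some (mid + t))).reverse)

def pvAloop (ptrn : List String) (exclude : Option Int) : List Int → Int
  | [] => 0
  | mid :: rest =>
    if pvSkip exclude mid then pvAloop ptrn exclude rest
    else if pvAcheck ptrn mid then mid
    else pvAloop ptrn exclude rest

def detect_vertical (ptrn : List String) (exclude : Option Int) : Int :=
  pvAloop ptrn exclude (PySem.List.pyRange 1 (ptrn.length : Int) 1)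

-- ===== PORT B =====
-- `all(a == b for a, b in zip(rev, rest))` (zip truncates to the shorter list)
def pvZipEq (xs ys : List String) : Bool :=
  (xs.zip ys).all (fun p => p.1 == p.2)

-- the `while rest:` walk; rev is the reversed prefix, mid the candidate axis
def pvBgo (exclude : Option Int) (rev : List String) : List String → Int → Int
  | [], _ => 0
  | r :: rest', mid =>
    if rest' = [] then 0
    else if pvSkip exclude mid then pvBgo exclude (r :: rev) rest' (mid + 1)
    else if pvZipEq (r :: rev) rest' then mid
    else pvBgo exclude (r :: rev) rest' (mid + 1)

def detect_vertical_alt (ptrn : List String) (exclude : Option Int) : Int :=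
  pvBgo exclude [] ptrn 1

-- ===== PRECONDITION & SPEC =====
def Spec_detect_vertical (ptrn : List String) (exclude : Option Int) (out : Int) : Prop := out = detect_vertical_alt ptrn exclude
instance (ptrn : List String) (exclude : Option Int) (out : Int) : Decidable (Spec_detect_vertical ptrn exclude out) := by unfold Spec_detect_vertical; infer_instance

-- ===== CLAIM (what is proved, stated in full; the proofs are below) =====
def Claim_equal_detect_vertical : Prop := ∀ (ptrn : List String) (exclude : Option Int), Dom_detect_vertical ptrn exclude → Spec_detect_vertical ptrn exclude (detect_vertical ptrn exclude)

-- ===== LEMMAS AND PROOFS =====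

-- pointwise characterisation of a valid axis at `mid`
def pvPoint (ptrn : List String) (i j : Int) : Prop :=
  ∀ k : Nat, 0 ≤ i - (k : Int) → j + (k : Int) < (ptrn.length : Int) →
    PySem.List.pyGet? ptrn (i - k) = PySem.List.pyGet? ptrn (j + k)

-- pointwise characterisation of A's slice-vs-reversed-slice comparison
lemma pvAcheck_iff (ptrn : List String) (mid : Int)
    (h1 : 1 ≤ mid) (h2 : mid < (ptrn.length : Int)) :
    pvAcheck ptrn mid = true ↔ pvPoint ptrn (mid - 1) mid := by
  simp only [pvAcheck, decide_eq_true_iff]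
  obtain ⟨t, ht⟩ : ∃ t : Int, t = min mid ((ptrn.length : Int) - mid) := ⟨_, rfl⟩
  rw [← ht]
  have ht0 : 0 ≤ t := by omega
  have htm : t ≤ mid := by omega
  have htn : t ≤ (ptrn.length : Int) - mid := by omega
  rw [PySem.List.slice_toNat ptrn (by omega) (by omega),
      PySem.List.slice_toNat ptrn (by omega) (by omega)]
  have e1 : mid.toNat - (mid - t).toNat = t.toNat := by omega
  have e2 : (mid + t).toNat - mid.toNat = t.toNat := by omega
  rw [e1, e2]
  have hLlen : ((ptrn.drop (mid - t).toNat).take t.toNat).length = t.toNat := by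
    simp [List.length_take, List.length_drop]; omega
  have hRlen : ((ptrn.drop mid.toNat).take t.toNat).length = t.toNat := by
    simp [List.length_take, List.length_drop]; omega
  have hget : ∀ a : Int, 0 ≤ a → PySem.List.pyGet? ptrn a = ptrn[a.toNat]? :=
    fun a ha => PySem.List.pyGet?_of_nonneg ptrn ha
  constructor
  · intro heq k hk1 hk2
    have hkt : k < t.toNat := by omega
    have h3 := congrArg (fun l => l[t.toNat - 1 - k]?) heq
    simp only [] at h3
    rw [List.getElem?_reverse (show t.toNat - 1 - k <
          (List.take t.toNat (List.drop mid.toNat ptrn)).length by rw [hRlen]; omega),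
        hRlen] at h3
    have ei : t.toNat - 1 - (t.toNat - 1 - k) = k := by omega
    rw [ei, List.getElem?_take_of_lt hkt, List.getElem?_drop,
        List.getElem?_take_of_lt (show t.toNat - 1 - k < t.toNat by omega),
        List.getElem?_drop] at h3
    rw [hget (mid - 1 - k) (by omega), hget (mid + k) (by omega)]
    have i1 : (mid - t).toNat + (t.toNat - 1 - k) = (mid - 1 - (k : Int)).toNat := by omega
    have i2 : mid.toNat + k = (mid + (k : Int)).toNat := by omega
    rw [← i1, ← i2]
    exact h3
  · intro hp
    apply List.ext_getElem?
    intro k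
    by_cases hk : k < t.toNat
    · rw [List.getElem?_take_of_lt hk, List.getElem?_drop,
        List.getElem?_reverse (show k <
          (List.take t.toNat (List.drop mid.toNat ptrn)).length by rw [hRlen]; omega),
        hRlen,
        List.getElem?_take_of_lt (show t.toNat - 1 - k < t.toNat by omega),
        List.getElem?_drop]
      have hc := hp (t.toNat - 1 - k) (by omega) (by omega)
      rw [hget _ (by omega), hget _ (by omega)] at hc
      have j1 : (mid - 1 - ((t.toNat - 1 - k : Nat) : Int)).toNat = (mid - t).toNat + k := by
        omega
      have j2 : (mid + ((t.toNat - 1 - k : Nat) : Int)).toNat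
          = mid.toNat + (t.toNat - 1 - k) := by omega
      rw [j1, j2] at hc
      exact hc
    · have l1 : ((ptrn.drop (mid - t).toNat).take t.toNat).length ≤ k := by
        rw [hLlen]; omega
      have l2 : ((ptrn.drop mid.toNat).take t.toNat).reverse.length ≤ k := by
        rw [List.length_reverse, hRlen]; omega
      rw [List.getElem?_eq_none l1, List.getElem?_eq_none l2]

-- the truncating zip comparison, index by index
lemma pvZipEq_iff (xs ys : List String) :
    pvZipEq xs ys = true ↔ ∀ k : Nat, k < xs.length → k < ys.length → xs[k]? = ys[k]? := by
  induction xs generalizing ys with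
  | nil => simp [pvZipEq]
  | cons x xs ih =>
    cases ys with
    | nil => simp [pvZipEq]
    | cons y ys =>
      simp only [pvZipEq, List.zip_cons_cons, List.all_cons, Bool.and_eq_true, beq_iff_eq]
      rw [show ((xs.zip ys).all fun p => p.1 == p.2) = pvZipEq xs ys from rfl, ih]
      constructor
      · rintro ⟨hxy, h⟩ k hk1 hk2
        match k with
        | 0 => simpa using hxy
        | Nat.succ m =>
          simpa using h m (by simpa using hk1) (by simpa using hk2)
      · intro h
        refine ⟨by simpa using h 0 (by simp) (by simp), fun k hk1 hk2 => ?_⟩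
        simpa using h (k + 1) (by simpa using hk1) (by simpa using hk2)

-- pointwise characterisation of B's zip comparison at state j (rev = reversed prefix)
lemma pvZipEq_point (ptrn : List String) (j : Nat)
    (h1 : 1 ≤ j) (h2 : j < ptrn.length) :
    pvZipEq ((ptrn.take j).reverse) (ptrn.drop j) = true ↔
      pvPoint ptrn ((j : Int) - 1) (j : Int) := by
  rw [pvZipEq_iff]
  have htakelen : (ptrn.take j).length = j := by
    simp [List.length_take]; omega
  have hdroplen : (ptrn.drop j).length = ptrn.length - j := by simp
  have hget : ∀ a : Int, 0 ≤ a → PySem.List.pyGet? ptrn a = ptrn[a.toNat]? :=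
    fun a ha => PySem.List.pyGet?_of_nonneg ptrn ha
  constructor
  · intro h k hk1 hk2
    have hkj : k < j := by omega
    have hkn : j + k < ptrn.length := by omega
    have hc := h k (by simp [htakelen]; omega) (by simp; omega)
    rw [List.getElem?_reverse (by rw [htakelen]; omega), htakelen,
        List.getElem?_take_of_lt (show j - 1 - k < j by omega),
        List.getElem?_drop] at hc
    rw [hget _ (by omega), hget _ (by omega)]
    have e1 : ((j : Int) - 1 - k).toNat = j - 1 - k := by omega
    have e2 : ((j : Int) + k).toNat = j + k := by omega
    rw [e1, e2]
    exact hc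
  · intro hp k hk1 hk2
    rw [List.length_reverse, htakelen] at hk1
    rw [List.length_drop] at hk2
    have hkj : k < j := hk1
    have hkn : j + k < ptrn.length := by omega
    rw [List.getElem?_reverse (by rw [htakelen]; omega), htakelen,
        List.getElem?_take_of_lt (show j - 1 - k < j by omega),
        List.getElem?_drop]
    have hc := hp k (by omega) (by omega)
    rw [hget _ (by omega), hget _ (by omega)] at hc
    have e1 : ((j : Int) - 1 - k).toNat = j - 1 - k := by omega
    have e2 : ((j : Int) + k).toNat = j + k := by omega
    rw [e1, e2] at hc
    exact hc

lemma pvChecks_eq (ptrn : List String) (j : Nat)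
    (h1 : 1 ≤ j) (h2 : j < ptrn.length) :
    pvAcheck ptrn (j : Int) = pvZipEq ((ptrn.take j).reverse) (ptrn.drop j) := by
  rw [Bool.eq_iff_iff, pvAcheck_iff ptrn j (by exact_mod_cast h1) (by exact_mod_cast h2),
      pvZipEq_point ptrn j h1 h2]

-- the walk from state j computes A's scan of the remaining candidates
lemma pvLoops_eq (ptrn : List String) (exclude : Option Int) :
    ∀ j : Nat, j ≤ ptrn.length →
      pvBgo exclude ((ptrn.take j).reverse) (ptrn.drop j) ((j : Int) + 1)
        = pvAloop ptrn exclude (PySem.List.pyRange ((j : Int) + 1) (ptrn.length : Int) 1) := by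
  intro j hj
  induction hfuel : ptrn.length - j generalizing j with
  | zero =>
    have hjn : j = ptrn.length := by omega
    rw [List.drop_eq_nil_of_le (by omega),
        PySem.List.pyRange_one_eq_nil (by omega)]
    rfl
  | succ m ih =>
    have hjn : j < ptrn.length := by omega
    obtain ⟨r, rest', hdrop⟩ : ∃ r rest', ptrn.drop j = r :: rest' := by
      cases hd : ptrn.drop j with
      | nil => exfalso; have := congrArg List.length hd; simp at this; omega
      | cons a b => exact ⟨a, b, rfl⟩
    have hrest' : rest' = ptrn.drop (j + 1) := by
      have := congrArg (List.drop 1) hdrop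
      simpa [List.drop_drop] using this.symm
    have hr : ptrn[j]? = some r := by
      have := congrArg (fun l => l[0]?) hdrop
      simpa [List.getElem?_drop] using this
    have htake : (ptrn.take (j + 1)).reverse = r :: (ptrn.take j).reverse := by
      rw [List.take_add_one, hr]
      simp
    rw [hdrop, pvBgo]
    by_cases hlast : rest' = []
    · have hlen : ptrn.length = j + 1 := by
        have := congrArg List.length hdrop
        rw [hlast] at this
        simp at this; omega
      rw [if_pos hlast, PySem.List.pyRange_one_eq_nil (by omega)]
      rfl
    · have hjn1 : j + 1 < ptrn.length := by
        have hl := congrArg List.length hdrop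
        simp at hl
        have hpos : 0 < rest'.length := List.length_pos_of_ne_nil hlast
        omega
      rw [if_neg hlast,
          PySem.List.pyRange_one_cons (by exact_mod_cast hjn1), pvAloop]
      have hcast : ((j : Int) + 1) = ((j + 1 : Nat) : Int) := by push_cast; ring
      have hchk : pvZipEq (r :: (ptrn.take j).reverse) rest'
          = pvAcheck ptrn ((j : Int) + 1) := by
        rw [← htake, hrest', hcast,
            pvChecks_eq ptrn (j + 1) (by omega) hjn1]
      have hrec : pvBgo exclude (r :: (ptrn.take j).reverse) rest' ((j : Int) + 1 + 1)
          = pvAloop ptrn exclude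
              (PySem.List.pyRange ((j : Int) + 1 + 1) (ptrn.length : Int) 1) := by
        rw [← htake, hrest']
        have := ih (j + 1) (by omega) (by omega)
        rw [hcast]
        push_cast at this ⊢
        exact this
      by_cases hs : pvSkip exclude ((j : Int) + 1)
      · rw [if_pos hs, if_pos hs, hrec]
      · rw [if_neg hs, if_neg hs, hchk]
        by_cases hc : pvAcheck ptrn ((j : Int) + 1)
        · rw [if_pos hc, if_pos hc]
        · rw [if_neg hc, if_neg hc, hrec]

-- ===== VERDICT (by name: the statement is the Claim_ definition above) =====
theorem detect_vertical_spec : Claim_equal_detect_vertical := by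
  intro ptrn exclude _
  unfold Spec_detect_vertical detect_vertical detect_vertical_alt
  have := (pvLoops_eq ptrn exclude 0 (by omega)).symm
  simpa using this
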